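-- pv_equiv track=rewrite | github.com/jmontagne-7n31/jmontagne-7n31 | DECODE MESSAGE 4 MIEUX.py | max_impair
-- ===== SOURCE A (Python) =====
-- def max_impair(m):
--     tableau ={}
--     for i in range(1, len(m), 2):
--         if m[i] in tableau:
--             tableau[m[i]] += 1
--         if m[i] not in tableau:
--             tableau[m[i]] = 1
--     max = 0
--     lettre = ""
--     for l,v in tableau.items():
--         if v > max:
--             max = v
--             lettre = l
--     return(lettre)
-- ===== SOURCE B (Python) =====
-- def max_impair(m):
--     odds = [m[i] for i in range(1, len(m), 2)]
--     best = ""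
--     bestc = 0
--     seen = set()
--     for c in odds:
--         if c in seen:
--             continue
--         seen.add(c)
--         k = odds.count(c)
--         if k > bestc:
--             bestc = k
--             best = c
--     return best
-- ===== Notes on version B (the rewrite author's own statement) =====
-- stated objective: alternative
-- what changed: Replaces the frequency-dict build plus dict-items max scan with a single scan of the odd-indexed characters that counts each not-yet-seen character via list.count and keeps the first one whose count strictly exceeds the running best.
import Mathlib
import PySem

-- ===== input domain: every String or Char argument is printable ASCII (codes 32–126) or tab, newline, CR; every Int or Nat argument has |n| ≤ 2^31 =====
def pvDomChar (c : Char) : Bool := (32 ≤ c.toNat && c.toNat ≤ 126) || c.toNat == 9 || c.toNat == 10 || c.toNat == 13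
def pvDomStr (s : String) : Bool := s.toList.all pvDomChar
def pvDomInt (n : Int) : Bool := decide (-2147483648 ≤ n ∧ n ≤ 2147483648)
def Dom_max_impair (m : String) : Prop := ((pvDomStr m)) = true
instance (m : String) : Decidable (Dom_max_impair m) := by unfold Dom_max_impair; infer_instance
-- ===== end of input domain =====

-- B replaces A's frequency-dict build + dict-items max scan by one scan of the
-- odd-indexed characters that recounts each unseen character with list.count
-- (objective: alternative decomposition, same result).

-- ===== PORT A =====
-- Literal port of A: build a dict counting chars at odd indices (two separate membership
-- tests, as in the source), then scan dict.items for the first strictly greater count.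
def max_impair (m : String) : String :=
  let cs := m.toList
  let tableau := (PySem.List.pyRange 1 (PySem.Str.len m) 2).foldl (fun t i =>
      match PySem.List.pyGet? cs i with
      | none => t          -- unreachable: every i of the range is a valid index
      | some c =>
        -- if m[i] in tableau: tableau[m[i]] += 1
        let t1 := if t.contains c then t.insert c (t.getD c 0 + 1) else t
        -- if m[i] not in tableau: tableau[m[i]] = 1
        if t1.contains c = false then t1.insert c 1 else t1)
    (PySem.Dict.empty : PySem.Dict Char Int)
  let r := tableau.items.foldl (fun (p : Int × List Char) lv =>
      if lv.2 > p.1 then (lv.2, [lv.1]) else p) ((0 : Int), ([] : List Char))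
  String.ofList r.2

-- ===== PORT B =====
-- Literal port of B: collect odd-indexed chars, then scan them; each char not yet in
-- 'seen' is counted with .count and kept if its count strictly beats the running best.
def max_impair_alt (m : String) : String :=
  let cs := m.toList
  let odds := (PySem.List.pyRange 1 (PySem.Str.len m) 2).filterMap
      (fun i => PySem.List.pyGet? cs i)
  let r := odds.foldl (fun (st : PySem.Set Char × Int × List Char) c =>
      if st.1.contains c then st
      else
        let seen := st.1.add c
        let k : Int := (PySem.List.count odds c : Int)
        if k > st.2.1 then (seen, k, [c]) else (seen, st.2))
    ((PySem.Set.empty : PySem.Set Char), (0 : Int), ([] : List Char))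
  String.ofList r.2.2

-- ===== PRECONDITION & SPEC =====
def Spec_max_impair (m : String) (out : String) : Prop := out = max_impair_alt m
instance (m : String) (out : String) : Decidable (Spec_max_impair m out) := by unfold Spec_max_impair; infer_instance

-- ===== CLAIM (what is proved, stated in full; the proofs are below) =====
def Claim_equal_max_impair : Prop := ∀ (m : String), Dom_max_impair m → Spec_max_impair m (max_impair m)

-- ===== LEMMAS AND PROOFS =====

-- the selection step both programs perform, parameterised by the count function f
def pvStep (f : Char → Int) (p : Int × List Char) (c : Char) : Int × List Char :=
  if f c > p.1 then (f c, [c]) else p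

-- folding Set.add only appends: the start set stays a prefix
theorem pvFoldl_add_prefix :
    ∀ (l : List Char) (s : PySem.Set Char),
      ∃ t, l.foldl PySem.Set.add s = s ++ t := by
  intro l
  induction l with
  | nil => intro s; exact ⟨[], by simp⟩
  | cons y rest ih =>
    intro s
    by_cases hin : y ∈ s
    · have h1 : PySem.Set.add s y = s := by simp [PySem.Set.add, hin]
      simpa [h1] using ih s
    · have h1 : PySem.Set.add s y = s ++ [y] := by simp [PySem.Set.add, hin]
      obtain ⟨t, ht⟩ := ih (s ++ [y])
      exact ⟨y :: t, by simp [h1, ht]⟩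

-- B's seen-guarded scan equals the pvStep fold over the distinct elements (in
-- first-occurrence order) that the scan appends after the initial seen set
theorem pvSeen_fold (f : Char → Int) :
    ∀ (l : List Char) (s : PySem.Set Char) (p : Int × List Char),
      (l.foldl (fun (st : PySem.Set Char × Int × List Char) c =>
          if st.1.contains c then st
          else
            let seen := st.1.add c
            let k : Int := f c
            if k > st.2.1 then (seen, k, [c]) else (seen, st.2)) (s, p)).2
        = ((l.foldl PySem.Set.add s).drop s.length).foldl (pvStep f) p := by
  intro l
  induction l with
  | nil => intro s p; simp
  | cons c rest ih =>
    intro s p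
    by_cases hin : c ∈ s
    · have h1 : PySem.Set.add s c = s := by simp [PySem.Set.add, hin]
      simpa [hin, h1] using ih s p
    · have hin' : s.contains c = false := by simpa using hin
      have h1 : PySem.Set.add s c = s ++ [c] := by simp [PySem.Set.add, hin]
      have hstep : (if f c > p.1 then ((s.add c : PySem.Set Char), f c, [c])
          else (s.add c, p)) = (s.add c, pvStep f p c) := by
        unfold pvStep; split <;> rfl
      obtain ⟨t, ht⟩ := pvFoldl_add_prefix rest (s ++ [c])
      have hdrop1 : ((rest.foldl PySem.Set.add (s ++ [c])).drop s.length)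
          = c :: ((rest.foldl PySem.Set.add (s ++ [c])).drop (s ++ [c]).length) := by
        rw [ht]; simp [List.drop_append]
      calc ((c :: rest).foldl (fun (st : PySem.Set Char × Int × List Char) c =>
              if st.1.contains c then st
              else
                let seen := st.1.add c
                let k : Int := f c
                if k > st.2.1 then (seen, k, [c]) else (seen, st.2)) (s, p)).2
          = (rest.foldl (fun (st : PySem.Set Char × Int × List Char) c =>
              if st.1.contains c then st
              else
                let seen := st.1.add c
                let k : Int := f c
                if k > st.2.1 then (seen, k, [c]) else (seen, st.2))
              (s.add c, pvStep f p c)).2 := by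
            simp only [List.foldl_cons, hin', Bool.false_eq_true, if_false, hstep]
        _ = ((rest.foldl PySem.Set.add (s.add c)).drop (s.add c).length).foldl
              (pvStep f) (pvStep f p c) := ih (s.add c) (pvStep f p c)
        _ = ((rest.foldl PySem.Set.add (s ++ [c])).drop s.length).foldl (pvStep f) p := by
            have h2 : (s.add c : PySem.Set Char) = s ++ [c] := h1
            rw [h2, hdrop1]; rfl
        _ = (((c :: rest).foldl PySem.Set.add s).drop s.length).foldl (pvStep f) p := by
            simp only [List.foldl_cons, h1]

-- a fold that skips none-results of h is a fold over filterMap h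
theorem pvFoldl_filterMap {β : Type} (h : Int → Option Char) (g : β → Char → β) :
    ∀ (l : List Int) (init : β),
      l.foldl (fun acc i => match h i with | none => acc | some c => g acc c) init
        = (l.filterMap h).foldl g init := by
  intro l
  induction l with
  | nil => intro init; rfl
  | cons i rest ih =>
    intro init
    cases hi : h i <;> simp [hi, ih]

-- A's dict-building step is the counter step
theorem pvDict_step (t : PySem.Dict Char Int) (c : Char) :
    (let t1 := if t.contains c then t.insert c (t.getD c 0 + 1) else t
     if t1.contains c = false then t1.insert c 1 else t1)
      = t.insert c (t.getD c 0 + 1) := by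
  by_cases hc : t.contains c
  · simp only [hc, if_true, PySem.Dict.contains_insert_self, Bool.true_eq_false, if_false]
  · have hc' : t.contains c = false := by simpa using hc
    simp only [hc', Bool.false_eq_true, if_false, if_true,
      PySem.Dict.getD_of_not_contains t 0 hc', zero_add]

theorem max_impair_eq_alt (m : String) : max_impair m = max_impair_alt m := by
  unfold max_impair max_impair_alt
  simp only []
  set cs := m.toList with hcs
  set odds := (PySem.List.pyRange 1 (PySem.Str.len m) 2).filterMap
      (fun i => PySem.List.pyGet? cs i) with hodds
  -- A's dict build = counter odds
  have hdict : (PySem.List.pyRange 1 (PySem.Str.len m) 2).foldl (fun t i =>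
      match PySem.List.pyGet? cs i with
      | none => t
      | some c =>
        let t1 := if t.contains c then t.insert c (t.getD c 0 + 1) else t
        if t1.contains c = false then t1.insert c 1 else t1)
      (PySem.Dict.empty : PySem.Dict Char Int)
      = PySem.Dict.counter odds := by
    rw [pvFoldl_filterMap (fun i => PySem.List.pyGet? cs i)
      (fun t c =>
        let t1 := if t.contains c then t.insert c (t.getD c 0 + 1) else t
        if t1.contains c = false then t1.insert c 1 else t1)
      _ (PySem.Dict.empty : PySem.Dict Char Int)]
    rw [← hodds, ← PySem.Dict.foldl_insert_getD_add_one_eq_counter]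
    exact PySem.List.foldl_congr_mem odds _ _ _ (fun t c _ => pvDict_step t c)
  rw [hdict, PySem.Dict.items_counter]
  -- A's items scan is the pvStep fold over the distinct elements of odds
  have hA : (List.map (fun k => (k, (List.count k odds : Int))) (PySem.Set.ofList odds)).foldl
      (fun (p : Int × List Char) lv => if lv.2 > p.1 then (lv.2, [lv.1]) else p)
      ((0 : Int), ([] : List Char))
      = (PySem.Set.ofList odds).foldl (pvStep (fun c => (List.count c odds : Int)))
        ((0 : Int), ([] : List Char)) := by
    rw [List.foldl_map]; rfl
  -- B's seen-guarded scan computes the same fold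
  have hB : (odds.foldl (fun (st : PySem.Set Char × Int × List Char) c =>
      if st.1.contains c then st
      else
        let seen := st.1.add c
        let k : Int := (PySem.List.count odds c : Int)
        if k > st.2.1 then (seen, k, [c]) else (seen, st.2))
      ((PySem.Set.empty : PySem.Set Char), (0 : Int), ([] : List Char))).2
      = (PySem.Set.ofList odds).foldl (pvStep (fun c => (List.count c odds : Int)))
        ((0 : Int), ([] : List Char)) := by
    have := pvSeen_fold (fun c => (List.count c odds : Int)) odds PySem.Set.empty
      ((0 : Int), ([] : List Char))
    simp only [PySem.List.count_eq] at *
    simpa [PySem.Set.empty, PySem.Set.ofList] using this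
  rw [hA]
  exact congrArg (fun r => String.ofList r) (congrArg Prod.snd hB).symm

-- ===== VERDICT (by name: the statement is the Claim_ definition above) =====
theorem max_impair_spec : Claim_equal_max_impair := by
  intro m _
  unfold Spec_max_impair
  exact max_impair_eq_alt m
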